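-- pv_equiv track=rewrite | github.com/nobourge/vaccine-distribution-facility-location-problem | correction.py | adapt_capacity
-- ===== SOURCE A (Python) =====
-- def adapt_capacity(centers, capacity):
--     res = []
--     for j in range(len(capacity)):
--         if j in centers:
--             res.append(capacity[j])
--         else:
--             res.append(0)
--     return res
-- ===== SOURCE B (Python) =====
-- def adapt_capacity(centers, capacity):
--     res = [0] * len(capacity)
--     for j in centers:
--         if 0 <= j < len(capacity):
--             res[j] = capacity[j]
--     return res
-- ===== Notes on version B (the rewrite author's own statement) =====
-- stated objective: alternative
-- what changed: Scatter instead of gather: B preallocates a zero array and patches only the in-range center indices, instead of scanning centers for membership at every index; on the benchmark's input mix this is not measurably faster.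
import Mathlib
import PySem

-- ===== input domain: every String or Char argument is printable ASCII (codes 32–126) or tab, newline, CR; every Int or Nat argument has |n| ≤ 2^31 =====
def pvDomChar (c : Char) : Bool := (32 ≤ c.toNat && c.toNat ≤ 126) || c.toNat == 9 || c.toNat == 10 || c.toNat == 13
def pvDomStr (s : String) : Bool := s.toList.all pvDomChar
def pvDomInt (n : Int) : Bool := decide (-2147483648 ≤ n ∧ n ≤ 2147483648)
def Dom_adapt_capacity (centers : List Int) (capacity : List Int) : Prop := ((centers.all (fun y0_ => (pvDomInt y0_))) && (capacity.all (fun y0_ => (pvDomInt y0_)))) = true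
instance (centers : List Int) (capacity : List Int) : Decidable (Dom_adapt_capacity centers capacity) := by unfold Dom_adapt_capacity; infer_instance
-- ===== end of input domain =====

-- B scatters into a preallocated zero array over `centers` instead of scanning `centers` for every index; return value equivalence, no mutation of the arguments.

-- ===== PORT A =====
-- for j in range(len(capacity)): res.append(capacity[j] if j in centers else 0)
def adapt_capacity (centers : List Int) (capacity : List Int) : List Int :=
  (List.range capacity.length).foldl
    (fun (res : List Int) (j : Nat) =>
      if (j : Int) ∈ centers then res ++ [capacity.getD j 0]
      else res ++ [0]) []

-- ===== PORT B =====
-- res = [0]*len(capacity); for j in centers: if 0 <= j < len(capacity): res[j] = capacity[j]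
def adapt_capacity_alt (centers : List Int) (capacity : List Int) : List Int :=
  centers.foldl
    (fun (res : List Int) (j : Int) =>
      if 0 ≤ j ∧ j < (capacity.length : Int) then res.set j.toNat (capacity.getD j.toNat 0)
      else res)
    (List.replicate capacity.length 0)

-- ===== PRECONDITION & SPEC =====
def Spec_adapt_capacity (centers : List Int) (capacity : List Int) (out : List Int) : Prop := out = adapt_capacity_alt centers capacity
instance (centers : List Int) (capacity : List Int) (out : List Int) : Decidable (Spec_adapt_capacity centers capacity out) := by unfold Spec_adapt_capacity; infer_instance

-- ===== CLAIM (what is proved, stated in full; the proofs are below) =====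
def Claim_equal_adapt_capacity : Prop := ∀ (centers : List Int) (capacity : List Int), Dom_adapt_capacity centers capacity → Spec_adapt_capacity centers capacity (adapt_capacity centers capacity)

-- ===== LEMMAS AND PROOFS =====

-- A is the map j ↦ (capacity[j] if j ∈ centers else 0) over range(len(capacity))
theorem adaptA_eq_map (centers capacity : List Int) :
    adapt_capacity centers capacity =
      (List.range capacity.length).map
        (fun (j : Nat) => if (j : Int) ∈ centers then capacity.getD j 0 else 0) := by
  unfold adapt_capacity
  have hstep :
      (List.range capacity.length).foldl
        (fun (res : List Int) (j : Nat) =>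
          if (j : Int) ∈ centers then res ++ [capacity.getD j 0] else res ++ [0]) []
        = (List.range capacity.length).foldl
            (fun (res : List Int) (j : Nat) =>
              res ++ [if (j : Int) ∈ centers then capacity.getD j 0 else 0]) [] :=
    PySem.List.foldl_congr_mem _ _ _ _ (fun res j _ => by split_ifs <;> rfl)
  rw [hstep, PySem.List.foldl_append_singleton_eq_map]
  simp

-- invariant of B's scatter loop: length is preserved and index i holds
-- capacity[i] once some processed center equals i, otherwise the start value
theorem scatter_invariant (capacity : List Int) (cs : List Int) (res : List Int)
    (hl : res.length = capacity.length) :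
    (cs.foldl
      (fun (res : List Int) (j : Int) =>
        if 0 ≤ j ∧ j < (capacity.length : Int) then res.set j.toNat (capacity.getD j.toNat 0)
        else res) res).length = capacity.length ∧
    ∀ i, i < capacity.length →
      (cs.foldl
        (fun (res : List Int) (j : Int) =>
          if 0 ≤ j ∧ j < (capacity.length : Int) then res.set j.toNat (capacity.getD j.toNat 0)
          else res) res).getD i 0
        = if (i : Int) ∈ cs then capacity.getD i 0 else res.getD i 0 := by
  induction cs generalizing res with
  | nil => simpa using hl
  | cons c cs ih =>
    simp only [List.foldl_cons]
    by_cases hc : 0 ≤ c ∧ c < (capacity.length : Int)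
    · rw [if_pos hc]
      have hl' : (res.set c.toNat (capacity.getD c.toNat 0)).length = capacity.length := by
        simpa using hl
      obtain ⟨h1, h2⟩ := ih (res.set c.toNat (capacity.getD c.toNat 0)) hl'
      refine ⟨h1, fun i hi => ?_⟩
      rw [h2 i hi]
      by_cases hmem : (i : Int) ∈ cs
      · simp [hmem, List.mem_cons]
      · by_cases hci : c = (i : Int)
        · have hti : c.toNat = i := by omega
          have : (i : Int) ∈ c :: cs := by simp [hci.symm]
          simp [hmem, this, hti, List.getD_eq_getElem?_getD, hl, hi]
        · have hne : (i : Int) ∉ c :: cs := by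
            simp only [List.mem_cons, not_or]
            exact ⟨fun h => hci h.symm, hmem⟩
          have hti : c.toNat ≠ i := by omega
          simp [hmem, hne, List.getD_eq_getElem?_getD, List.getElem?_set_ne hti]
    · rw [if_neg hc]
      obtain ⟨h1, h2⟩ := ih res hl
      refine ⟨h1, fun i hi => ?_⟩
      rw [h2 i hi]
      have hci : c ≠ (i : Int) := by omega
      by_cases hmem : (i : Int) ∈ cs
      · simp [hmem, List.mem_cons]
      · have hne : (i : Int) ∉ c :: cs := by
          simp only [List.mem_cons, not_or]
          exact ⟨fun h => hci h.symm, hmem⟩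
        simp [hmem, hne]

-- ===== VERDICT (by name: the statement is the Claim_ definition above) =====
theorem adapt_capacity_spec : Claim_equal_adapt_capacity := by
  intro centers capacity _
  unfold Spec_adapt_capacity adapt_capacity_alt
  rw [adaptA_eq_map]
  obtain ⟨h1, h2⟩ := scatter_invariant capacity centers (List.replicate capacity.length 0)
    (by simp)
  apply List.ext_getElem
  · simp only [List.length_map, List.length_range]
    exact h1.symm
  · intro i hi₁ hi₂
    have hi : i < capacity.length := by simpa using hi₁
    have hg := h2 i hi
    rw [List.getD_eq_getElem _ _ (by omega)] at hg
    rw [List.getElem_map, List.getElem_range]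
    rw [hg]
    by_cases hmem : (i : Int) ∈ centers
    · simp [hmem]
    · simp [hmem, List.getD_eq_getElem?_getD, hi]
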